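-- pv_equiv track=rewrite | github.com/aviswerdlow/k4 | experiments/pipeline_v5_2_1/scripts/augmenters/function_glue.py | find_low_saliency_positions
-- ===== SOURCE A (Python) =====
-- from typing import List, Tuple, Optional
--
-- FUNCTION_WORDS = {
--     'THE', 'OF', 'AND', 'TO', 'IN', 'IS', 'ARE', 'WAS',
--     'THEN', 'THERE', 'HERE', 'WITH', 'AT', 'BY', 'WE'
-- }
--
-- def find_low_saliency_positions(text: str) -> List[Tuple[int, str]]:
--     """Find positions where glue can be inserted without disrupting meaning."""
--
--     positions = []
--     words = text.split()
--
--     # Position 1: After first noun (typically position 2-3)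
--     if len(words) >= 3:
--         # Look for pattern: VERB NOUN ...
--         if words[0].upper() not in FUNCTION_WORDS:  # Likely a verb
--             if words[1].upper() not in FUNCTION_WORDS:  # Likely a noun
--                 positions.append((2, "after_first_noun"))
--
--     # Position 2: Before AND (if exists)
--     for i, word in enumerate(words):
--         if word.upper() == "AND" and i > 0:
--             positions.append((i, "before_and"))
--             break
--
--     # Position 3: After second verb (common in templates)
--     verb_count = 0
--     for i, word in enumerate(words):
--         if word.upper() not in FUNCTION_WORDS and i > 0:
--             # Simple heuristic: non-function word after function word might be verb
--             if i > 0 and words[i-1].upper() in FUNCTION_WORDS: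
--                 verb_count += 1
--                 if verb_count == 2:
--                     positions.append((i+1, "after_second_verb"))
--                     break
--
--     # Position 4: Before final noun phrase
--     if len(words) >= 4:
--         # If last 2-3 words contain THE + noun
--         if words[-2].upper() == "THE":
--             positions.append((len(words)-2, "before_final_noun"))
--
--     return positions
-- ===== SOURCE B (Python) =====
-- FUNCTION_WORDS = {
--     'THE', 'OF', 'AND', 'TO', 'IN', 'IS', 'ARE', 'WAS',
--     'THEN', 'THERE', 'HERE', 'WITH', 'AT', 'BY', 'WE'
-- }
--
-- def find_low_saliency_positions(text):
--     """Single state-machine pass: instead of three separate index loops, walk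
--     the words once from index 1 carrying (prev-word-is-function-word, verb
--     count, first-AND slot, second-verb slot) as explicit state, then emit the
--     four slots in the fixed order."""
--     words = text.split()
--     n = len(words)
--     out = []
--     if n >= 3 and words[0].upper() not in FUNCTION_WORDS \
--               and words[1].upper() not in FUNCTION_WORDS:
--         out.append((2, "after_first_noun"))
--     and_pos = None
--     verb_pos = None
--     verbs = 0
--     prev_fw = words[0].upper() in FUNCTION_WORDS if words else False
--     for i, word in enumerate(words[1:], 1):
--         w = word.upper()
--         is_fw = w in FUNCTION_WORDS
--         if and_pos is None and w == "AND":
--             and_pos = i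
--         if verb_pos is None and not is_fw and prev_fw:
--             verbs += 1
--             if verbs == 2:
--                 verb_pos = i + 1
--         prev_fw = is_fw
--     if and_pos is not None:
--         out.append((and_pos, "before_and"))
--     if verb_pos is not None:
--         out.append((verb_pos, "after_second_verb"))
--     if n >= 4 and words[-2].upper() == "THE":
--         out.append((n - 2, "before_final_noun"))
--     return out
-- ===== Notes on version B (the rewrite author's own statement) =====
-- stated objective: alternative
-- what changed: B fuses A's three separate scans into one state-machine pass over the word tail that carries (prev-word-is-function-word, verb count, first-AND slot, second-verb slot) as explicit accumulator state, eliminating A's enumerate loops with words[i-1] back-indexing and break statements; the four slots are then emitted in the fixed order.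
import Mathlib
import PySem

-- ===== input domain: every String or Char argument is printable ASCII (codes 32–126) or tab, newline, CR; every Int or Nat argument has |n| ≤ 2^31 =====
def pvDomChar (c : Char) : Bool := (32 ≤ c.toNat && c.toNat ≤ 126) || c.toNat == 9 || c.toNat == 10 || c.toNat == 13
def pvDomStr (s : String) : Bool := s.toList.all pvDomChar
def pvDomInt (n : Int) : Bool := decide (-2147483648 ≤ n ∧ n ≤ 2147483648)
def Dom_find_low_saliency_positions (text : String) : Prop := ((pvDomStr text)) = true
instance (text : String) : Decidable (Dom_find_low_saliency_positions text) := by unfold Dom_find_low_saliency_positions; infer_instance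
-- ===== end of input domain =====

-- B replaces A's three separate loops by one state-machine pass over the tail of the
-- word list carrying (prev-is-function-word, verb count, AND slot, verb slot) as
-- explicit state (objective: alternative decomposition, same cost).

-- ===== PORT A =====
def FUNCTION_WORDS : PySem.Set String := PySem.Set.ofList
  ["THE", "OF", "AND", "TO", "IN", "IS", "ARE", "WAS",
   "THEN", "THERE", "HERE", "WITH", "AT", "BY", "WE"]

-- 'for i, word in enumerate(words): if word.upper() == "AND" and i > 0: …append…; break'
def pvAndLoop : List (Int × String) → Option Int
  | [] => none
  | (i, w) :: rest =>
    if PySem.Str.upper w == "AND" && decide (i > 0) then some i else pvAndLoop rest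

-- the verb-count loop; words[i-1] is in range whenever it is read (i > 0 guard), so pyGetD is exact
def pvVerbLoop (words : List String) : List (Int × String) → Nat → Option Int
  | [], _ => none
  | (i, w) :: rest, vc =>
    if !(FUNCTION_WORDS.contains (PySem.Str.upper w)) && decide (i > 0) then
      if decide (i > 0) && FUNCTION_WORDS.contains (PySem.Str.upper (PySem.List.pyGetD words (i - 1) "")) then
        if vc + 1 == 2 then some (i + 1) else pvVerbLoop words rest (vc + 1)
      else pvVerbLoop words rest vc
    else pvVerbLoop words rest vc

def find_low_saliency_positions (text : String) : List (Int × String) :=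
  let positions : List (Int × String) := []
  let words := PySem.Str.split₀ text
  -- indices 0, 1, -2 are guarded by the length checks, so pyGetD is exact
  let positions :=
    if words.length ≥ 3 then
      if !(FUNCTION_WORDS.contains (PySem.Str.upper (PySem.List.pyGetD words 0 ""))) then
        if !(FUNCTION_WORDS.contains (PySem.Str.upper (PySem.List.pyGetD words 1 ""))) then
          positions ++ [((2 : Int), "after_first_noun")]
        else positions
      else positions
    else positions
  let positions :=
    match pvAndLoop (PySem.List.enumerate words) with
    | some i => positions ++ [(i, "before_and")]
    | none => positions
  let positions :=
    match pvVerbLoop words (PySem.List.enumerate words) 0 with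
    | some p => positions ++ [(p, "after_second_verb")]
    | none => positions
  let positions :=
    if words.length ≥ 4 then
      if PySem.Str.upper (PySem.List.pyGetD words (-2) "") == "THE" then
        positions ++ [((words.length : Int) - 2, "before_final_noun")]
      else positions
    else positions
  positions

-- ===== PORT B =====
-- the single 'for i, word in enumerate(words[1:], 1)' state-machine loop of Source B;
-- state = (and_pos, verb_pos, verbs, prev_fw)
def pvBScan : List (Int × String) → Bool → Option Int → Option Int → Nat → Option Int × Option Int
  | [], _, ap, vp, _ => (ap, vp)
  | (i, word) :: rest, prevFw, ap, vp, verbs =>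
    let w := PySem.Str.upper word
    let isFw := FUNCTION_WORDS.contains w
    let ap' := if ap.isNone && w == "AND" then some i else ap
    let (vp', verbs') :=
      if vp.isNone && !isFw && prevFw then
        (if verbs + 1 == 2 then some (i + 1) else vp, verbs + 1)
      else (vp, verbs)
    pvBScan rest isFw ap' vp' verbs'

def find_low_saliency_positions_alt (text : String) : List (Int × String) :=
  let words := PySem.Str.split₀ text
  let n := words.length
  let out : List (Int × String) := []
  let out :=
    if decide (n ≥ 3) && !(FUNCTION_WORDS.contains (PySem.Str.upper (PySem.List.pyGetD words 0 "")))
                      && !(FUNCTION_WORDS.contains (PySem.Str.upper (PySem.List.pyGetD words 1 ""))) then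
      out ++ [((2 : Int), "after_first_noun")]
    else out
  let prevFw := match words with
    | [] => false
    | w0 :: _ => FUNCTION_WORDS.contains (PySem.Str.upper w0)
  let (andPos, verbPos) := pvBScan (PySem.List.enumerate (words.drop 1) 1) prevFw none none 0
  let out := match andPos with
    | some i => out ++ [(i, "before_and")]
    | none => out
  let out := match verbPos with
    | some p => out ++ [(p, "after_second_verb")]
    | none => out
  let out :=
    if decide (n ≥ 4) && (PySem.Str.upper (PySem.List.pyGetD words (-2) "") == "THE") then
      out ++ [((n : Int) - 2, "before_final_noun")]
    else out
  out

-- ===== PRECONDITION & SPEC =====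
def Spec_find_low_saliency_positions (text : String) (out : List (Int × String)) : Prop := out = find_low_saliency_positions_alt text
instance (text : String) (out : List (Int × String)) : Decidable (Spec_find_low_saliency_positions text out) := by unfold Spec_find_low_saliency_positions; infer_instance

-- ===== CLAIM (what is proved, stated in full; the proofs are below) =====
def Claim_equal_find_low_saliency_positions : Prop := ∀ (text : String), Dom_find_low_saliency_positions text → Spec_find_low_saliency_positions text (find_low_saliency_positions text)

-- ===== LEMMAS AND PROOFS =====

-- JOINT INVARIANT: the fused scan computes exactly (A's AND-loop result, A's verb-loop result)
set_option maxHeartbeats 2000000 in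
theorem bscan_eq (words : List String) (rest : List String) (i : Int)
    (prevFw : Bool) (ap vp : Option Int) (vc : Nat)
    (hi : 1 ≤ i)
    (hd : words.drop i.toNat = rest)
    (hp : prevFw = FUNCTION_WORDS.contains (PySem.Str.upper (PySem.List.pyGetD words (i - 1) ""))) :
    pvBScan (PySem.List.enumerate rest i) prevFw ap vp vc
      = ((if ap.isSome then ap else pvAndLoop (PySem.List.enumerate rest i)),
         (if vp.isSome then vp else pvVerbLoop words (PySem.List.enumerate rest i) vc)) := by
  induction rest generalizing i prevFw ap vp vc with
  | nil =>
      cases ap <;> cases vp <;>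
        simp [PySem.List.enumerate_nil, pvBScan, pvAndLoop, pvVerbLoop]
  | cons c rest' ih =>
    have hlen : i.toNat < words.length := by
      rcases Nat.lt_or_ge i.toNat words.length with h | h
      · exact h
      · exact absurd (List.drop_eq_nil_of_le h) (by rw [hd]; simp)
    have hc : words[i.toNat] = c := by
      have h0 : (words.drop i.toNat)[0]'(by rw [hd]; simp) = c := by simp [hd]
      rw [List.getElem_drop] at h0
      simpa using h0
    have hd' : words.drop (i + 1).toNat = rest' := by
      have h1 : (i + 1).toNat = i.toNat + 1 := by omega
      have h2 := congrArg (List.drop 1) hd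
      rw [List.drop_drop] at h2
      simp only [h1]
      simpa [Nat.add_comm] using h2
    have hp' : FUNCTION_WORDS.contains (PySem.Str.upper c)
        = FUNCTION_WORDS.contains (PySem.Str.upper (PySem.List.pyGetD words ((i + 1) - 1) "")) := by
      have : i + 1 - 1 = i := by ring
      rw [this, PySem.List.pyGetD_eq_getElem words "" (by omega) (by omega), hc]
    have hig : (decide (i > 0)) = true := by simp; omega
    have IH : ∀ (ap vp : Option Int) (vc : Nat),
        pvBScan (PySem.List.enumerate rest' (i + 1)) (FUNCTION_WORDS.contains (PySem.Str.upper c)) ap vp vc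
          = ((if ap.isSome then ap else pvAndLoop (PySem.List.enumerate rest' (i + 1))),
             (if vp.isSome then vp else pvVerbLoop words (PySem.List.enumerate rest' (i + 1)) vc)) :=
      fun ap vp vc => ih (i + 1) _ ap vp vc (by omega) hd' hp'
    rw [PySem.List.enumerate_cons]
    by_cases hA : (PySem.Str.upper c == "AND") = true <;>
    by_cases hF : FUNCTION_WORDS.contains (PySem.Str.upper c) = true <;>
    by_cases hPF : prevFw = true <;>
    cases ap <;> cases vp <;>
      simp_all [pvBScan, pvAndLoop, pvVerbLoop, IH, hig, ← hp]

-- ===== VERDICT (by name: the statement is the Claim_ definition above) =====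
set_option maxHeartbeats 2000000 in
theorem find_low_saliency_positions_spec : Claim_equal_find_low_saliency_positions := by
  intro text _
  unfold Spec_find_low_saliency_positions
  simp only [find_low_saliency_positions, find_low_saliency_positions_alt]
  generalize PySem.Str.split₀ text = ws
  cases ws with
  | nil => simp [pvAndLoop, pvVerbLoop, pvBScan, PySem.List.enumerate_nil]
  | cons w0 rest =>
    have hB := bscan_eq (w0 :: rest) rest 1 (FUNCTION_WORDS.contains (PySem.Str.upper w0))
      none none 0 (by omega) (by simp)
      (by simp [PySem.List.pyGetD_zero_cons])
    simp only [Option.isSome_none, Bool.false_eq_true, if_false] at hB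
    have hdrop : (w0 :: rest).drop 1 = rest := by simp
    have hAstep : pvAndLoop (PySem.List.enumerate (w0 :: rest)) = pvAndLoop (PySem.List.enumerate rest 1) := by
      rw [PySem.List.enumerate_cons]; simp [pvAndLoop]
    have hVstep : pvVerbLoop (w0 :: rest) (PySem.List.enumerate (w0 :: rest)) 0
        = pvVerbLoop (w0 :: rest) (PySem.List.enumerate rest 1) 0 := by
      rw [PySem.List.enumerate_cons]; simp [pvVerbLoop]
    rw [hdrop, hB, hAstep, hVstep]
    by_cases h3 : (w0 :: rest).length ≥ 3 <;>
    by_cases hc1 : FUNCTION_WORDS.contains (PySem.Str.upper (PySem.List.pyGetD (w0 :: rest) 0 "")) = true <;>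
    by_cases hc2 : FUNCTION_WORDS.contains (PySem.Str.upper (PySem.List.pyGetD (w0 :: rest) 1 "")) = true <;>
    by_cases h4 : (w0 :: rest).length ≥ 4 <;>
    by_cases hthe : (PySem.Str.upper (PySem.List.pyGetD (w0 :: rest) (-2) "") == "THE") = true <;>
    cases hA : pvAndLoop (PySem.List.enumerate rest 1) <;>
    cases hV : pvVerbLoop (w0 :: rest) (PySem.List.enumerate rest 1) 0 <;>
      simp_all [PySem.List.pyGetD_zero_cons]
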